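-- pv_equiv track=rewrite | github.com/XsedoX/CryptographyAndBasicsOfCryptanalysis | Labs/sbox_calculations.py | calculate_function_linearity
-- ===== SOURCE A (Python) =====
-- def extract_function_from_row_notation(in_row_notation_dict, column, amount_of_arguments):
--     result = []
--     for rowNumber in range(2 ** amount_of_arguments):
--         result.append(in_row_notation_dict[rowNumber][column])
--     return result
--
-- def hamming_distance(function1, function2):
--     distance = 0
--     for index, _ in enumerate(function1):
--         xored_value = function2[index] ^ function1[index]
--         if xored_value == 1:
--             distance += 1
--
--     return distance
--
-- def calculate_function_linearity(sbox_function, linear_functions_dict_row_notation: dict, amount_of_arguments):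
--     min_distance = None
--     columns = len(linear_functions_dict_row_notation[0])
--     for column in range(columns):
--         distance = hamming_distance(
--             extract_function_from_row_notation(linear_functions_dict_row_notation, column, amount_of_arguments),
--             sbox_function)
--         if min_distance is None:
--             min_distance = distance
--         else:
--             min_distance = min(min_distance, distance)
--
--     return min_distance
-- ===== SOURCE B (Python) =====
-- def calculate_function_linearity(sbox_function, linear_functions_dict_row_notation, amount_of_arguments):
--     columns = len(linear_functions_dict_row_notation[0])
--     if not columns:
--         return None
--     dist = [0] * columns
--     for row_number in range(2 ** amount_of_arguments):
--         row = linear_functions_dict_row_notation[row_number]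
--         s = sbox_function[row_number]
--         dist = [d + 1 if (row[c] ^ s) == 1 else d for c, d in enumerate(dist)]
--     return min(dist)
-- ===== Notes on version B (the rewrite author's own statement) =====
-- stated objective: alternative
-- what changed: B replaces A's per-column passes (extract the column, then a separate Hamming-distance pass, repeated for every column) by a single row-major traversal of the dict that maintains one distance accumulator per column, taking the minimum of the accumulator vector at the end.
-- outside the precondition, e.g. on calculate_function_linearity([1], {0: []}, 0): A returns None, B returns None
import Mathlib
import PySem

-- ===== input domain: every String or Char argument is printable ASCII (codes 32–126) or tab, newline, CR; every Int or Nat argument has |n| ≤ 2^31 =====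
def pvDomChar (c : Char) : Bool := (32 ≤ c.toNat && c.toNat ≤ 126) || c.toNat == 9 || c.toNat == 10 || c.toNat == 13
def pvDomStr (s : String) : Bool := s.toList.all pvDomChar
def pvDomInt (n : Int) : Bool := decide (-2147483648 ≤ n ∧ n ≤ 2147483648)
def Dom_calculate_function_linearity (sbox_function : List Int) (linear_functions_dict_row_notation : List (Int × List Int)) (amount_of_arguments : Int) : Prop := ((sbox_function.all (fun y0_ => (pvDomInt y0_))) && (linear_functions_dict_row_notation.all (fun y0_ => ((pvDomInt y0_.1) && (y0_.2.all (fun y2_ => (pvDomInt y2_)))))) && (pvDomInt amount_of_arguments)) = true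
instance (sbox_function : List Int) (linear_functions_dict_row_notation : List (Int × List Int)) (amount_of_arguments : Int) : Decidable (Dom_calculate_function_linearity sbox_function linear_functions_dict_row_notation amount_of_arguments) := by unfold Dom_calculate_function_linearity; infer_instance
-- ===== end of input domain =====

-- B replaces A's per-column extract-then-hamming passes by one row-major pass over the dict
-- maintaining a vector of per-column distance accumulators, then takes the minimum (objective: alternative decomposition, same cost).

-- ===== PORT A =====
-- dict lookup (dict ported as insertion-ordered assoc list); .getD [] only fires outside Pre_
def pvRow (d : List (Int × List Int)) (r : Int) : List Int :=
  ((PySem.Dict.ofList d).get? r).getD []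

def extract_function_from_row_notation (in_row_notation_dict : List (Int × List Int)) (column : Int) (amount_of_arguments : Int) : List Int :=
  (PySem.List.pyRange 0 ((2:Int) ^ amount_of_arguments.toNat) 1).foldl
    (fun result rowNumber => result ++ [PySem.List.pyGetD (pvRow in_row_notation_dict rowNumber) column 0])
    []

def hamming_distance (function1 function2 : List Int) : Int :=
  (PySem.List.enumerate function1 0).foldl
    (fun distance p =>
      let xored_value := PySem.Int.bxor (PySem.List.pyGetD function2 p.1 0) (PySem.List.pyGetD function1 p.1 0)
      if xored_value = 1 then distance + 1 else distance)
    0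

def calculate_function_linearity (sbox_function : List Int) (linear_functions_dict_row_notation : List (Int × List Int)) (amount_of_arguments : Int) : Int :=
  let columns : Int := ((pvRow linear_functions_dict_row_notation 0).length : Int)
  let min_distance :=
    (PySem.List.pyRange 0 columns 1).foldl
      (fun min_distance column =>
        let distance := hamming_distance
          (extract_function_from_row_notation linear_functions_dict_row_notation column amount_of_arguments)
          sbox_function
        match min_distance with
        | none => some distance
        | some m => some (min m distance))
      (none : Option Int)
  min_distance.getD 0   -- A returns None only when columns = 0, excluded by Pre_

-- ===== PORT B =====
def calculate_function_linearity_alt (sbox_function : List Int) (linear_functions_dict_row_notation : List (Int × List Int)) (amount_of_arguments : Int) : Int :=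
  let columns := (((PySem.Dict.ofList linear_functions_dict_row_notation).get? 0).getD []).length
  if columns = 0 then 0   -- Source B returns None here, excluded by Pre_
  else
    let dist :=
      (PySem.List.pyRange 0 ((2:Int) ^ amount_of_arguments.toNat) 1).foldl
        (fun dist row_number =>
          let row := ((PySem.Dict.ofList linear_functions_dict_row_notation).get? row_number).getD []
          let s := PySem.List.pyGetD sbox_function row_number 0
          (PySem.List.enumerate dist 0).map
            (fun p => if PySem.Int.bxor (PySem.List.pyGetD row p.1 0) s = 1 then p.2 + 1 else p.2))
        (List.replicate columns (0:Int))
    (PySem.List.min? dist (fun x => x)).getD 0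

-- ===== PRECONDITION & SPEC =====
-- Pre_ = exactly the inputs where the Python A returns an int: key 0 present and its row nonempty
-- (len(dict[0]) = 0 makes A return None, not an int), amount_of_arguments ≥ 0 (range(2**a) raises
-- TypeError for a < 0), sbox_function covers all 2^a indices (else IndexError), and every row
-- 0..2^a-1 is a key of the dict with at least `columns` entries (else KeyError/IndexError).
-- (a.toNat ≤ Nat.log2 sbox_function.length ↔ 2^a ≤ len(sbox_function) for nonempty sbox_function.)
def Pre_calculate_function_linearity (sbox_function : List Int) (linear_functions_dict_row_notation : List (Int × List Int)) (amount_of_arguments : Int) : Prop :=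
  0 ≤ amount_of_arguments ∧
  ((PySem.Dict.ofList linear_functions_dict_row_notation).get? 0).isSome = true ∧
  (((PySem.Dict.ofList linear_functions_dict_row_notation).get? 0).getD []).length ≠ 0 ∧
  sbox_function ≠ [] ∧
  amount_of_arguments.toNat ≤ Nat.log2 sbox_function.length ∧
  ∀ r ∈ PySem.List.pyRange 0 ((2:Int) ^ amount_of_arguments.toNat) 1,
    ((PySem.Dict.ofList linear_functions_dict_row_notation).get? r).isSome = true ∧
    (((PySem.Dict.ofList linear_functions_dict_row_notation).get? 0).getD []).length ≤
      (((PySem.Dict.ofList linear_functions_dict_row_notation).get? r).getD []).length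

instance (sbox_function : List Int) (linear_functions_dict_row_notation : List (Int × List Int)) (amount_of_arguments : Int) : Decidable (Pre_calculate_function_linearity sbox_function linear_functions_dict_row_notation amount_of_arguments) := by unfold Pre_calculate_function_linearity; infer_instance

def pvWitness_calculate_function_linearity : List Int × (List (Int × List Int)) × Int :=
  ([0, 1], [(0, [0]), (1, [1])], 1)

def Spec_calculate_function_linearity (sbox_function : List Int) (linear_functions_dict_row_notation : List (Int × List Int)) (amount_of_arguments : Int) (out : Int) : Prop := out = calculate_function_linearity_alt sbox_function linear_functions_dict_row_notation amount_of_arguments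
instance (sbox_function : List Int) (linear_functions_dict_row_notation : List (Int × List Int)) (amount_of_arguments : Int) (out : Int) : Decidable (Spec_calculate_function_linearity sbox_function linear_functions_dict_row_notation amount_of_arguments out) := by unfold Spec_calculate_function_linearity; infer_instance

-- ===== CLAIM (what is proved, stated in full; the proofs are below) =====
def Claim_equal_calculate_function_linearity : Prop := ∀ (sbox_function : List Int) (linear_functions_dict_row_notation : List (Int × List Int)) (amount_of_arguments : Int), Dom_calculate_function_linearity sbox_function linear_functions_dict_row_notation amount_of_arguments → Pre_calculate_function_linearity sbox_function linear_functions_dict_row_notation amount_of_arguments → Spec_calculate_function_linearity sbox_function linear_functions_dict_row_notation amount_of_arguments (calculate_function_linearity sbox_function linear_functions_dict_row_notation amount_of_arguments)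

-- ===== LEMMAS AND PROOFS =====

theorem pv_extract_eq_map (d : List (Int × List Int)) (c a : Int) :
    extract_function_from_row_notation d c a =
      (PySem.List.pyRange 0 ((2:Int) ^ a.toNat) 1).map (fun r => PySem.List.pyGetD (pvRow d r) c 0) := by
  unfold extract_function_from_row_notation
  rw [PySem.List.foldl_append_singleton_eq_map]
  simp
theorem pv_hamming (f1 f2 : List Int) :
    hamming_distance f1 f2 =
      ((PySem.List.pyRange 0 (f1.length : Int) 1).countP
        (fun j => decide (PySem.Int.bxor (PySem.List.pyGetD f2 j 0) (PySem.List.pyGetD f1 j 0) = 1)) : Int) := by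
  unfold hamming_distance
  rw [PySem.List.enumerate_eq_map_pyRange (d := 0), List.foldl_map]
  rw [PySem.List.foldl_ite_add_one]
  simp
theorem pv_hamming_eq_countP (d : List (Int × List Int)) (s : List Int) (c a : Int) :
    hamming_distance (extract_function_from_row_notation d c a) s =
      ((PySem.List.pyRange 0 ((2:Int) ^ a.toNat) 1).countP
        (fun j => decide (PySem.Int.bxor (PySem.List.pyGetD (pvRow d j) c 0) (PySem.List.pyGetD s j 0) = 1)) : Int) := by
  rw [pv_extract_eq_map, pv_hamming]
  have hlen : (((PySem.List.pyRange 0 ((2:Int) ^ a.toNat) 1).map (fun r => PySem.List.pyGetD (pvRow d r) c 0)).length : Int) = (2:Int) ^ a.toNat := by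
    simp [PySem.List.length_pyRange_one]
  rw [hlen]
  congr 1
  apply List.countP_congr
  intro j hj
  have hj' := (PySem.List.mem_pyRange_one).1 hj
  rw [PySem.List.pyGetD_map_pyRange_of_nonneg _ _ _ _ hj'.1 hj'.2]
  rw [PySem.Int.bxor_comm]
theorem pv_enumerate_map {α β : Type} (f : α → β) (l : List α) (s : Int) :
    PySem.List.enumerate (l.map f) s = (PySem.List.enumerate l s).map (fun q => (q.1, f q.2)) := by
  induction l generalizing s with
  | nil => simp [PySem.List.enumerate_nil]
  | cons x t ih => simp [PySem.List.enumerate_cons, ih]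
theorem pv_enumerate_enumerate {α : Type} (v : List α) (s : Int) :
    PySem.List.enumerate (PySem.List.enumerate v s) s = (PySem.List.enumerate v s).map (fun p => (p.1, p)) := by
  induction v generalizing s with
  | nil => simp [PySem.List.enumerate_nil]
  | cons x t ih => simp [PySem.List.enumerate_cons, ih]
theorem pv_bfold (d : List (Int × List Int)) (s : List Int) (rs : List Int) (v : List Int) :
    (rs.foldl
      (fun dist r =>
        (PySem.List.enumerate dist 0).map
          (fun p => if PySem.Int.bxor (PySem.List.pyGetD (((PySem.Dict.ofList d).get? r).getD []) p.1 0) (PySem.List.pyGetD s r 0) = 1 then p.2 + 1 else p.2))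
      v) =
    (PySem.List.enumerate v 0).map
      (fun p => p.2 + (rs.countP (fun r => decide (PySem.Int.bxor (PySem.List.pyGetD (pvRow d r) p.1 0) (PySem.List.pyGetD s r 0) = 1)) : Int)) := by
  induction rs generalizing v with
  | nil => simp [PySem.List.map_snd_enumerate]
  | cons r rs ih =>
    rw [List.foldl_cons, ih, pv_enumerate_map, pv_enumerate_enumerate, List.map_map, List.map_map]
    apply List.map_congr_left
    intro p hp
    simp only [Function.comp, List.countP_cons, pvRow]
    by_cases h : PySem.Int.bxor (PySem.List.pyGetD (((PySem.Dict.ofList d).get? r).getD []) p.1 0) (PySem.List.pyGetD s r 0) = 1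
    · simp [h]
      ring
    · simp [h]
theorem pv_foldl_optminD (D : Int → Int) (t : List Int) (m : Int) :
    t.foldl (fun md c => match md with | none => some (D c) | some m' => some (min m' (D c))) (some m) =
      some (t.foldl (fun acc c => min acc (D c)) m) := by
  induction t generalizing m with
  | nil => rfl
  | cons x t ih => simp [List.foldl_cons, ih]

theorem pv_A_fold (D : Int → Int) (l : List Int) (h : l ≠ []) :
    (l.foldl (fun md c => match md with | none => some (D c) | some m => some (min m (D c))) (none : Option Int)).getD 0 =
      (PySem.List.min? (l.map D) (fun x => x)).getD 0 := by
  obtain ⟨c, t, rfl⟩ := List.exists_cons_of_ne_nil h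
  simp only [List.foldl_cons]
  rw [pv_foldl_optminD, List.map_cons, PySem.List.min?_id_cons, List.foldl_map]

-- the per-column distance list of A equals B's accumulated dist vector
theorem pv_lists_eq (s : List Int) (d : List (Int × List Int)) (a : Int) :
    (PySem.List.pyRange 0 (((((PySem.Dict.ofList d).get? 0).getD []).length : Nat) : Int) 1).map
        (fun c => hamming_distance (extract_function_from_row_notation d c a) s) =
      ((PySem.List.pyRange 0 ((2:Int) ^ a.toNat) 1).foldl
        (fun dist row_number =>
          (PySem.List.enumerate dist 0).map
            (fun p => if PySem.Int.bxor (PySem.List.pyGetD (((PySem.Dict.ofList d).get? row_number).getD []) p.1 0) (PySem.List.pyGetD s row_number 0) = 1 then p.2 + 1 else p.2))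
        (List.replicate (((PySem.Dict.ofList d).get? 0).getD []).length (0:Int))) := by
  rw [pv_bfold]
  apply List.ext_getElem
  · simp [PySem.List.length_pyRange_one, PySem.List.length_enumerate]
  · intro k h1 h2
    rw [List.getElem_map, List.getElem_map, PySem.List.getElem_pyRange_one, PySem.List.getElem_enumerate]
    rw [List.getElem_replicate]
    rw [pv_hamming_eq_countP]
    simp [pvRow]


-- ===== VERDICT (by name: the statement is the Claim_ definition above) =====
theorem calculate_function_linearity_spec : Claim_equal_calculate_function_linearity := by
  intro s d a _ _
  unfold Spec_calculate_function_linearity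
  unfold calculate_function_linearity calculate_function_linearity_alt
  simp only [pvRow]
  by_cases hc : (((PySem.Dict.ofList d).get? 0).getD []).length = 0
  · rw [if_pos hc, hc]
    simp [PySem.List.pyRange_one_eq_nil]
  · rw [if_neg hc, ← pv_lists_eq]
    apply pv_A_fold
    intro hnil
    have := congrArg List.length hnil
    simp [PySem.List.length_pyRange_one] at this
    exact hc (by simp [this])
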